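-- pv_equiv track=rewrite | github.com/pagadalacharankarthik/Knowledge-Graph-Builder | Milestone_4/backend/graph.py | canonicalize_entities
-- ===== SOURCE A (Python) =====
-- def canonicalize_entities(entity_list, threshold=80):
--     if not entity_list:
--         return []
--     canonical_forms = []
--     processed_entities = set()
--     sorted_entities = sorted(list(set(entity_list)), key=len, reverse=True)
--
--     for current_entity in sorted_entities:
--         if current_entity in processed_entities:
--             continue
--         best_match = current_entity
--         for other_entity in sorted_entities:
--             if current_entity == other_entity or other_entity in processed_entities:
--                 continue
--             if current_entity in other_entity or other_entity in current_entity: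
--                 processed_entities.add(other_entity)
--         canonical_forms.append(best_match)
--         processed_entities.add(best_match)
--
--     return sorted(list(set(canonical_forms)))
-- ===== SOURCE B (Python) =====
-- def canonicalize_entities(entity_list, threshold=80):
--     kept = []
--     for e in sorted(set(entity_list), key=len, reverse=True):
--         if not any(e in o for o in kept):
--             kept.append(e)
--     return sorted(kept)
-- ===== Notes on version B (the rewrite author's own statement) =====
-- stated objective: faster
-- what changed: Drops A's processed-set and its full-list substring-marking inner loop: B walks the distinct entities once in decreasing length and keeps an entity iff it is not a substring of an already-kept (maximal) entity, comparing each entity only against the kept list instead of the whole list.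
import Mathlib
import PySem

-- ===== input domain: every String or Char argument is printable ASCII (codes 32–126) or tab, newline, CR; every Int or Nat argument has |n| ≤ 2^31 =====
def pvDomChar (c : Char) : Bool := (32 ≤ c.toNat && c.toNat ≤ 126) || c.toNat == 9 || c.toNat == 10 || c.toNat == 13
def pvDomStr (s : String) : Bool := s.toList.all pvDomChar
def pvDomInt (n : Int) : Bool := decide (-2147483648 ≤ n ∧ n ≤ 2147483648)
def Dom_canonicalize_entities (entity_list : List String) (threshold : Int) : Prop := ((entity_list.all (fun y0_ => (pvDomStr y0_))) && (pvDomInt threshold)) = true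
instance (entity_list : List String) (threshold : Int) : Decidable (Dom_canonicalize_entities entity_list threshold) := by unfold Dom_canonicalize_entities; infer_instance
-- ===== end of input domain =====

-- B drops A's processed-set and its full-list marking loop: it keeps an entity iff it is not a
-- substring of an already-kept (maximal) entity, comparing only against the kept list; objective: faster.
-- A's returned value does not depend on the hash order of its intermediate set, so both ports are exact.

-- ===== PORT A =====
-- the inner 'for other_entity in sorted_entities' loop of A
def pvInnerA (sorted_entities : List String) (current_entity : String) (processed : PySem.Set String) : PySem.Set String :=
  sorted_entities.foldl (fun processed other_entity =>
    if current_entity == other_entity || processed.contains other_entity then processed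
    else if PySem.Str.isIn current_entity other_entity || PySem.Str.isIn other_entity current_entity then
      PySem.Set.add processed other_entity
    else processed) processed

-- the body of A's outer loop; state = (canonical_forms, processed_entities)
def pvStepA (sorted_entities : List String) (st : List String × PySem.Set String) (current_entity : String) :
    List String × PySem.Set String :=
  if st.2.contains current_entity then st
  else
    let best_match := current_entity
    (st.1 ++ [best_match], PySem.Set.add (pvInnerA sorted_entities current_entity st.2) best_match)

def canonicalize_entities (entity_list : List String) (threshold : Int) : List String :=
  if entity_list = [] then []
  else
    let sorted_entities := PySem.List.sorted (PySem.Set.ofList entity_list) (fun s => PySem.Str.len s) true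
    let st := sorted_entities.foldl (pvStepA sorted_entities) ([], PySem.Set.empty)
    PySem.List.sorted (PySem.Set.ofList st.1) (fun s => s) false

-- ===== PORT B =====
def canonicalize_entities_alt (entity_list : List String) (threshold : Int) : List String :=
  let kept := (PySem.List.sorted (PySem.Set.ofList entity_list) (fun s => PySem.Str.len s) true).foldl
    (fun kept e => if kept.any (fun o => PySem.Str.isIn e o) then kept else kept ++ [e]) []
  PySem.List.sorted kept (fun s => s) false

-- ===== PRECONDITION & SPEC =====
def Spec_canonicalize_entities (entity_list : List String) (threshold : Int) (out : List String) : Prop := out = canonicalize_entities_alt entity_list threshold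
instance (entity_list : List String) (threshold : Int) (out : List String) : Decidable (Spec_canonicalize_entities entity_list threshold out) := by unfold Spec_canonicalize_entities; infer_instance

-- ===== CLAIM (what is proved, stated in full; the proofs are below) =====
def Claim_equal_canonicalize_entities : Prop := ∀ (entity_list : List String) (threshold : Int), Dom_canonicalize_entities entity_list threshold → Spec_canonicalize_entities entity_list threshold (canonicalize_entities entity_list threshold)

-- ===== LEMMAS AND PROOFS =====

-- x is "maximal" in U: no other element of U has x as a substring
def Maxi (U : List String) (x : String) : Prop :=
  ∀ o ∈ U, o ≠ x → PySem.Str.isIn x o = false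

theorem isIn_self (x : String) : PySem.Str.isIn x x = true := by
  rw [PySem.Str.isIn_iff_infix]

theorem isIn_trans {a b c : String} (h1 : PySem.Str.isIn a b = true)
    (h2 : PySem.Str.isIn b c = true) : PySem.Str.isIn a c = true := by
  rw [PySem.Str.isIn_iff_infix] at *
  exact h1.trans h2

theorem length_lt_of_isIn {a b : String} (h : PySem.Str.isIn a b = true) (hne : a ≠ b) :
    a.toList.length < b.toList.length := by
  rw [PySem.Str.isIn_iff_infix] at h
  have hs := h.sublist
  refine lt_of_le_of_ne hs.length_le (fun he => hne ?_)
  have := hs.eq_of_length he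
  exact String.toList_injective this

-- every element of U is a substring of some maximal element of U
theorem exists_maximal (U : List String) : ∀ (n : Nat) (x : String), x ∈ U →
    (U.filter (fun z => decide (x.toList.length < z.toList.length))).length ≤ n →
    ∃ k ∈ U, Maxi U k ∧ PySem.Str.isIn x k = true := by
  intro n
  induction n with
  | zero =>
    intro x hx hn
    by_cases hM : Maxi U x
    · exact ⟨x, hx, hM, isIn_self x⟩
    · exfalso
      unfold Maxi at hM
      push Not at hM
      obtain ⟨o, ho, hne, hio⟩ := hM
      replace hio : PySem.Str.isIn x o = true := by revert hio; cases PySem.Str.isIn x o <;> simp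
      have hlt := length_lt_of_isIn hio (Ne.symm hne)
      have : o ∈ U.filter (fun z => decide (x.toList.length < z.toList.length)) :=
        List.mem_filter.mpr ⟨ho, decide_eq_true hlt⟩
      have := List.length_pos_of_mem this
      omega
  | succ n ih =>
    intro x hx hn
    by_cases hM : Maxi U x
    · exact ⟨x, hx, hM, isIn_self x⟩
    · unfold Maxi at hM
      push Not at hM
      obtain ⟨o, ho, hne, hio⟩ := hM
      replace hio : PySem.Str.isIn x o = true := by revert hio; cases PySem.Str.isIn x o <;> simp
      have hlt := length_lt_of_isIn hio (Ne.symm hne)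
      have hmono : List.Sublist (U.filter (fun z => decide (o.toList.length < z.toList.length))) (U.filter (fun z => decide (x.toList.length < z.toList.length))) := by
        refine List.monotone_filter_right U ?_
        intro a ha
        simp only [decide_eq_true_eq] at *
        omega
      have hmemq : o ∈ U.filter (fun z => decide (x.toList.length < z.toList.length)) :=
        List.mem_filter.mpr ⟨ho, decide_eq_true hlt⟩
      have hnotp : o ∉ U.filter (fun z => decide (o.toList.length < z.toList.length)) := by
        intro hmem
        have := of_decide_eq_true (List.mem_filter.mp hmem).2
        omega
      have hle := hmono.length_le
      have hlt2 : (U.filter (fun z => decide (o.toList.length < z.toList.length))).length <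
          (U.filter (fun z => decide (x.toList.length < z.toList.length))).length := by
        rcases lt_or_eq_of_le hle with h | h
        · exact h
        · exact absurd (hmono.eq_of_length h ▸ hmemq) hnotp
      obtain ⟨k, hk, hMk, hok⟩ := ih o ho (by omega)
      exact ⟨k, hk, hMk, isIn_trans hio hok⟩

-- membership after A's inner marking loop
theorem mem_pvInnerA (L : List String) (cur : String) (proc : PySem.Set String) (x : String) :
    x ∈ pvInnerA L cur proc ↔
      x ∈ proc ∨ (x ∈ L ∧ x ≠ cur ∧ (PySem.Str.isIn cur x || PySem.Str.isIn x cur) = true) := by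
  unfold pvInnerA
  induction L generalizing proc with
  | nil => simp
  | cons o rest ih =>
    simp only [List.foldl_cons]
    rw [List.mem_cons]
    by_cases hco : cur = o
    · subst hco
      rw [if_pos (by simp)]
      rw [ih]
      constructor
      · rintro (hp | ⟨h1, h2, h3⟩)
        · exact Or.inl hp
        · exact Or.inr ⟨Or.inr h1, h2, h3⟩
      · rintro (hp | ⟨(rfl | h1), h2, h3⟩)
        · exact Or.inl hp
        · exact absurd rfl h2
        · exact Or.inr ⟨h1, h2, h3⟩
    · by_cases hpo : o ∈ proc
      · rw [if_pos (by simp [hpo])]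
        rw [ih]
        constructor
        · rintro (hp | ⟨h1, h2, h3⟩)
          · exact Or.inl hp
          · exact Or.inr ⟨Or.inr h1, h2, h3⟩
        · rintro (hp | ⟨(rfl | h1), h2, h3⟩)
          · exact Or.inl hp
          · exact Or.inl hpo
          · exact Or.inr ⟨h1, h2, h3⟩
      · have hg : ¬ ((cur == o || PySem.Set.contains proc o) = true) := by
          simp only [Bool.or_eq_true, beq_iff_eq]
          rintro (h | h)
          · exact hco h
          · exact hpo ((PySem.Set.contains_iff proc o).mp h)
        rw [if_neg hg]
        by_cases h2 : (PySem.Str.isIn cur o || PySem.Str.isIn o cur) = true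
        · rw [if_pos h2, ih]
          constructor
          · rintro (hp | ⟨h1a, h1b, h1c⟩)
            · rcases (PySem.Set.mem_add _ _ _).mp hp with hp' | rfl
              · exact Or.inl hp'
              · exact Or.inr ⟨Or.inl rfl, Ne.symm hco, h2⟩
            · exact Or.inr ⟨Or.inr h1a, h1b, h1c⟩
          · rintro (hp | ⟨(rfl | h1), hb, hc⟩)
            · exact Or.inl ((PySem.Set.mem_add _ _ _).mpr (Or.inl hp))
            · exact Or.inl ((PySem.Set.mem_add _ _ _).mpr (Or.inr rfl))
            · exact Or.inr ⟨h1, hb, hc⟩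
        · rw [if_neg h2, ih]
          constructor
          · rintro (hp | ⟨h1, hb, hc⟩)
            · exact Or.inl hp
            · exact Or.inr ⟨Or.inr h1, hb, hc⟩
          · rintro (hp | ⟨(rfl | h1), hb, hc⟩)
            · exact Or.inl hp
            · exact absurd hc h2
            · exact Or.inr ⟨h1, hb, hc⟩

-- invariant of A's outer loop
theorem loop_char (L : List String) (hnd : L.Nodup)
    (hsort : L.Pairwise (fun a b => b.toList.length ≤ a.toList.length)) :
    ∀ (R P forms : List String) (proc : PySem.Set String),
    L = P ++ R →
    (∀ x, x ∈ forms ↔ x ∈ P ∧ Maxi L x) →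
    (∀ x, x ∈ proc ↔ x ∈ L ∧ ∃ k, k ∈ P ∧ Maxi L k ∧ PySem.Str.isIn x k = true) →
    ∀ x, x ∈ (R.foldl (pvStepA L) (forms, proc)).1 ↔ (x ∈ L ∧ Maxi L x) := by
  intro R
  induction R with
  | nil =>
    intro P forms proc hL hF _hP x
    simp only [List.foldl_nil]
    rw [hF x]
    rw [List.append_nil] at hL
    subst hL
    exact Iff.rfl
  | cons cur R' ih =>
    intro P forms proc hL hF hPc x
    simp only [List.foldl_cons]
    have hcurL : cur ∈ L := by rw [hL]; exact List.mem_append_right _ (List.mem_cons_self)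
    have hcurP : cur ∉ P := by
      have hnd' : (P ++ cur :: R').Nodup := hL ▸ hnd
      rcases List.nodup_append.mp hnd' with ⟨-, -, hdis⟩
      intro hmem; exact hdis cur hmem cur List.mem_cons_self rfl
    have hlong : ∀ o ∈ L, cur.toList.length < o.toList.length → o ∈ P := by
      intro o ho hlt
      rw [hL] at ho
      rcases List.mem_append.mp ho with h | h
      · exact h
      · exfalso
        rcases List.mem_cons.mp h with rfl | h'
        · omega
        · have hp : (cur :: R').Pairwise (fun a b => b.toList.length ≤ a.toList.length) := by
            have hs : (P ++ cur :: R').Pairwise (fun a b => b.toList.length ≤ a.toList.length) :=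
              hL ▸ hsort
            exact (List.pairwise_append.mp hs).2.1
          have := (List.pairwise_cons.mp hp).1 o h'
          omega
    by_cases hc : PySem.Set.contains proc cur = true
    · have hcurproc : cur ∈ proc := (PySem.Set.contains_iff proc cur).mp hc
      have hstep : pvStepA L (forms, proc) cur = (forms, proc) := by simp [pvStepA, hcurproc]
      rw [hstep]
      obtain ⟨_, k, hkP, hMk, hik⟩ := (hPc cur).mp hcurproc
      have hkcur : k ≠ cur := fun h => hcurP (h ▸ hkP)
      have hnotMax : ¬ Maxi L cur := by
        intro hM
        have hkL : k ∈ L := by rw [hL]; exact List.mem_append_left _ hkP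
        have hfalse := hM k hkL hkcur
        rw [hfalse] at hik; cases hik
      refine ih (P ++ [cur]) forms proc (by simp [hL]) ?_ ?_ x
      · intro y
        rw [hF y]
        constructor
        · rintro ⟨h1, h2⟩; exact ⟨List.mem_append_left _ h1, h2⟩
        · rintro ⟨h1, h2⟩
          rcases List.mem_append.mp h1 with h | h
          · exact ⟨h, h2⟩
          · rcases List.mem_singleton.mp h with rfl
            exact absurd h2 hnotMax
      · intro y
        rw [hPc y]
        constructor
        · rintro ⟨h1, k', hk', hMk', hik'⟩
          exact ⟨h1, k', List.mem_append_left _ hk', hMk', hik'⟩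
        · rintro ⟨h1, k', hk', hMk', hik'⟩
          rcases List.mem_append.mp hk' with h | h
          · exact ⟨h1, k', h, hMk', hik'⟩
          · rcases List.mem_singleton.mp h with rfl
            exact absurd hMk' hnotMax
    · have hcurnot : cur ∉ proc := by intro h; exact hc ((PySem.Set.contains_iff proc cur).mpr h)
      have hstep : pvStepA L (forms, proc) cur =
          (forms ++ [cur], PySem.Set.add (pvInnerA L cur proc) cur) := by
        simp [pvStepA, hcurnot]
      rw [hstep]
      have hMcur : Maxi L cur := by
        by_contra hM
        obtain ⟨k, hkL, hMk, hik⟩ := exists_maximal L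
          (L.filter (fun z => decide (cur.toList.length < z.toList.length))).length cur hcurL
          (le_refl _)
        have hkcur : k ≠ cur := by rintro rfl; exact hM hMk
        have hlt := length_lt_of_isIn hik (fun h => hkcur h.symm)
        have hkP := hlong k hkL hlt
        exact hcurnot ((hPc cur).mpr ⟨hcurL, k, hkP, hMk, hik⟩)
      refine ih (P ++ [cur]) (forms ++ [cur]) _ (by simp [hL]) ?_ ?_ x
      · intro y
        rw [List.mem_append, hF y, List.mem_singleton]
        constructor
        · rintro (⟨h1, h2⟩ | rfl)
          · exact ⟨List.mem_append_left _ h1, h2⟩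
          · exact ⟨List.mem_append_right _ (List.mem_singleton_self _), hMcur⟩
        · rintro ⟨h1, h2⟩
          rcases List.mem_append.mp h1 with h | h
          · exact Or.inl ⟨h, h2⟩
          · exact Or.inr (List.mem_singleton.mp h)
      · intro y
        rw [PySem.Set.mem_add, mem_pvInnerA, hPc y]
        constructor
        · rintro ((⟨h1, k', hk', hMk', hik'⟩ | ⟨hyL, hyne, hrel⟩) | hyc)
          · exact ⟨h1, k', List.mem_append_left _ hk', hMk', hik'⟩
          · have hrel' : PySem.Str.isIn cur y = true ∨ PySem.Str.isIn y cur = true := by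
              simpa using hrel
            rcases hrel' with h | h
            · rw [hMcur y hyL hyne] at h; cases h
            · exact ⟨hyL, cur, List.mem_append_right _ (List.mem_singleton_self _), hMcur, h⟩
          · rw [hyc]
            exact ⟨hcurL, cur, List.mem_append_right _ (List.mem_singleton_self _), hMcur,
              isIn_self cur⟩
        · rintro ⟨h1, k', hk', hMk', hik'⟩
          rcases List.mem_append.mp hk' with h | h
          · exact Or.inl (Or.inl ⟨h1, k', h, hMk', hik'⟩)
          · have hkc : k' = cur := List.mem_singleton.mp h
            rw [hkc] at hik'
            by_cases hyc : y = cur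
            · exact Or.inr hyc
            · exact Or.inl (Or.inr ⟨h1, hyc, by rw [hik']; simp⟩)

-- B's kept list stays duplicate-free
theorem loopB_nodup : ∀ (R kept : List String), kept.Nodup →
    (R.foldl (fun kept e => if kept.any (fun o => PySem.Str.isIn e o) then kept else kept ++ [e])
      kept).Nodup := by
  intro R
  induction R with
  | nil => intro kept h; simpa using h
  | cons e R' ih =>
    intro kept hnd
    simp only [List.foldl_cons]
    by_cases h : kept.any (fun o => PySem.Str.isIn e o) = true
    · rw [if_pos h]; exact ih _ hnd
    · rw [if_neg h]
      have he : e ∉ kept := fun hm => h (List.any_eq_true.mpr ⟨e, hm, isIn_self e⟩)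
      refine ih _ (List.nodup_append.mpr ⟨hnd, List.nodup_singleton _, ?_⟩)
      intro a ha b hb heq
      rw [List.mem_singleton] at hb
      subst heq
      exact he (hb ▸ ha)

-- invariant of B's single sweep: kept is exactly the set of maximal entities seen so far
theorem loopB_char (L : List String) (hnd : L.Nodup)
    (hsort : L.Pairwise (fun a b => b.toList.length ≤ a.toList.length)) :
    ∀ (R P kept : List String),
    L = P ++ R →
    (∀ x, x ∈ kept ↔ x ∈ P ∧ Maxi L x) →
    ∀ x, x ∈ R.foldl
      (fun kept e => if kept.any (fun o => PySem.Str.isIn e o) then kept else kept ++ [e]) kept ↔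
      (x ∈ L ∧ Maxi L x) := by
  intro R
  induction R with
  | nil =>
    intro P kept hL hK x
    simp only [List.foldl_nil]
    rw [hK x]
    rw [List.append_nil] at hL
    subst hL
    exact Iff.rfl
  | cons cur R' ih =>
    intro P kept hL hK x
    simp only [List.foldl_cons]
    have hcurL : cur ∈ L := by rw [hL]; exact List.mem_append_right _ (List.mem_cons_self)
    have hcurP : cur ∉ P := by
      have hnd' : (P ++ cur :: R').Nodup := hL ▸ hnd
      rcases List.nodup_append.mp hnd' with ⟨-, -, hdis⟩
      intro hmem; exact hdis cur hmem cur List.mem_cons_self rfl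
    have hlong : ∀ o ∈ L, cur.toList.length < o.toList.length → o ∈ P := by
      intro o ho hlt
      rw [hL] at ho
      rcases List.mem_append.mp ho with h | h
      · exact h
      · exfalso
        rcases List.mem_cons.mp h with rfl | h'
        · omega
        · have hp : (cur :: R').Pairwise (fun a b => b.toList.length ≤ a.toList.length) := by
            have hs : (P ++ cur :: R').Pairwise (fun a b => b.toList.length ≤ a.toList.length) :=
              hL ▸ hsort
            exact (List.pairwise_append.mp hs).2.1
          have := (List.pairwise_cons.mp hp).1 o h'
          omega
    by_cases hc : kept.any (fun o => PySem.Str.isIn cur o) = true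
    · rw [if_pos hc]
      obtain ⟨o, hoK, hio⟩ := List.any_eq_true.mp hc
      obtain ⟨hoP, hMo⟩ := (hK o).mp hoK
      have hone : o ≠ cur := fun h => hcurP (h ▸ hoP)
      have hnotMax : ¬ Maxi L cur := by
        intro hM
        have hoL : o ∈ L := by rw [hL]; exact List.mem_append_left _ hoP
        have hfalse := hM o hoL hone
        rw [hfalse] at hio; cases hio
      refine ih (P ++ [cur]) kept (by simp [hL]) ?_ x
      intro y
      rw [hK y]
      constructor
      · rintro ⟨h1, h2⟩; exact ⟨List.mem_append_left _ h1, h2⟩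
      · rintro ⟨h1, h2⟩
        rcases List.mem_append.mp h1 with h | h
        · exact ⟨h, h2⟩
        · have hyc : y = cur := List.mem_singleton.mp h
          exact absurd (hyc ▸ h2) hnotMax
    · rw [if_neg hc]
      have hMcur : Maxi L cur := by
        by_contra hM
        obtain ⟨k, hkL, hMk, hik⟩ := exists_maximal L
          (L.filter (fun z => decide (cur.toList.length < z.toList.length))).length cur hcurL
          (le_refl _)
        have hkcur : k ≠ cur := by rintro rfl; exact hM hMk
        have hlt := length_lt_of_isIn hik (fun h => hkcur h.symm)
        have hkP := hlong k hkL hlt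
        have hkK : k ∈ kept := (hK k).mpr ⟨hkP, hMk⟩
        exact hc (List.any_eq_true.mpr ⟨k, hkK, hik⟩)
      refine ih (P ++ [cur]) (kept ++ [cur]) (by simp [hL]) ?_ x
      intro y
      rw [List.mem_append, hK y, List.mem_singleton]
      constructor
      · rintro (⟨h1, h2⟩ | hyc)
        · exact ⟨List.mem_append_left _ h1, h2⟩
        · rw [hyc]
          exact ⟨List.mem_append_right _ (List.mem_singleton_self _), hMcur⟩
      · rintro ⟨h1, h2⟩
        rcases List.mem_append.mp h1 with h | h
        · exact Or.inl ⟨h, h2⟩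
        · exact Or.inr (List.mem_singleton.mp h)

-- ===== VERDICT (by name: the statement is the Claim_ definition above) =====
theorem canonicalize_entities_spec : Claim_equal_canonicalize_entities := by
  intro el th _hdom
  unfold Spec_canonicalize_entities
  by_cases hel : el = []
  · subst hel; rfl
  · simp only [canonicalize_entities, canonicalize_entities_alt, if_neg hel]
    have hperm : (PySem.List.sorted (PySem.Set.ofList el) (fun s => PySem.Str.len s) true).Perm
        (PySem.Set.ofList el) := PySem.List.sorted_perm _ _ _
    have hnd : (PySem.List.sorted (PySem.Set.ofList el) (fun s => PySem.Str.len s) true).Nodup :=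
      hperm.symm.nodup (PySem.Set.nodup_ofList el)
    have hsort : (PySem.List.sorted (PySem.Set.ofList el) (fun s => PySem.Str.len s)
        true).Pairwise (fun a b => b.toList.length ≤ a.toList.length) := by
      have hp := PySem.List.sorted_pairwise_rev (PySem.Set.ofList el) (fun s => PySem.Str.len s)
      refine hp.imp ?_
      intro a b h
      rw [PySem.Str.len_eq, PySem.Str.len_eq] at h
      exact_mod_cast h
    have hA := loop_char (PySem.List.sorted (PySem.Set.ofList el) (fun s => PySem.Str.len s) true)
      hnd hsort (PySem.List.sorted (PySem.Set.ofList el) (fun s => PySem.Str.len s) true) [] []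
      PySem.Set.empty (List.nil_append _).symm (by simp) (by simp)
    have hB := loopB_char (PySem.List.sorted (PySem.Set.ofList el) (fun s => PySem.Str.len s) true)
      hnd hsort (PySem.List.sorted (PySem.Set.ofList el) (fun s => PySem.Str.len s) true) [] []
      (List.nil_append _).symm (by simp)
    have hBnd := loopB_nodup
      (PySem.List.sorted (PySem.Set.ofList el) (fun s => PySem.Str.len s) true) [] List.nodup_nil
    refine PySem.List.sorted_eq_sorted_of_perm _ _ _ (fun a b h => h) ?_
    refine (List.perm_ext_iff_of_nodup (PySem.Set.nodup_ofList _) hBnd).mpr ?_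
    intro a
    rw [PySem.Set.mem_ofList, hA a, hB a]
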